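-- pv_equiv track=rewrite | github.com/juantadayunemi/SIMPTV | backend/apps/entities/management/commands/generate_entities.py | _generate_models_init
-- ===== SOURCE A (Python) =====
-- from typing import Dict, List, Any, Tuple, Set
--
-- def _generate_models_init(categorized_interfaces: Dict[str, Dict]) -> str:
--     """Generate models/__init__.py with all imports"""
--     lines = []
--     lines.append('"""')
--     lines.append("ENTITIES MODELS - Organized by Category")
--     lines.append("Auto-generated from TypeScript entities")
--     lines.append('"""')
--     lines.append("")
--     lines.append("from .base import BaseModel")
--     lines.append("")
--
--     # Import all models from each category
--     for category, interfaces in categorized_interfaces.items():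
--         if interfaces:
--             lines.append(f"# {category.title()} Models")
--             model_names = list(interfaces.keys())
--             lines.append(f"from .{category} import (")
--             for model_name in model_names:
--                 lines.append(f"    {model_name},")
--             lines.append(")")
--             lines.append("")
--
--     # Create __all__ list
--     lines.append("__all__ = [")
--     lines.append('    "BaseModel",')
--     for category, interfaces in categorized_interfaces.items():
--         if interfaces:
--             for model_name in interfaces.keys():
--                 lines.append(f'    "{model_name}",')
--     lines.append("]")
--
--     return "\n".join(lines)
-- ===== SOURCE B (Python) =====
-- def _generate_models_init(categorized_interfaces):
--     """Generate models/__init__.py with all imports (single pass, two buffers)"""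
--     import_lines = []
--     all_lines = []
--     for category, interfaces in categorized_interfaces.items():
--         if not interfaces:
--             continue
--         import_lines.append(f"# {category.title()} Models")
--         import_lines.append(f"from .{category} import (")
--         import_lines.extend(f"    {name}," for name in interfaces)
--         import_lines.append(")")
--         import_lines.append("")
--         all_lines.extend(f'    "{name}",' for name in interfaces)
--     header = [
--         '"""',
--         "ENTITIES MODELS - Organized by Category",
--         "Auto-generated from TypeScript entities",
--         '"""',
--         "",
--         "from .base import BaseModel",
--         "",
--     ]
--     return "\n".join(
--         header
--         + import_lines
--         + ["__all__ = [", '    "BaseModel",']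
--         + all_lines
--         + ["]"]
--     )
-- ===== Notes on version B (the rewrite author's own statement) =====
-- stated objective: simpler
-- what changed: B replaces A's two sequential scans of categorized_interfaces (one for import blocks, one for __all__ entries) with a single pass that maintains two line buffers and assembles the final text once at the end.
import Mathlib
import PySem

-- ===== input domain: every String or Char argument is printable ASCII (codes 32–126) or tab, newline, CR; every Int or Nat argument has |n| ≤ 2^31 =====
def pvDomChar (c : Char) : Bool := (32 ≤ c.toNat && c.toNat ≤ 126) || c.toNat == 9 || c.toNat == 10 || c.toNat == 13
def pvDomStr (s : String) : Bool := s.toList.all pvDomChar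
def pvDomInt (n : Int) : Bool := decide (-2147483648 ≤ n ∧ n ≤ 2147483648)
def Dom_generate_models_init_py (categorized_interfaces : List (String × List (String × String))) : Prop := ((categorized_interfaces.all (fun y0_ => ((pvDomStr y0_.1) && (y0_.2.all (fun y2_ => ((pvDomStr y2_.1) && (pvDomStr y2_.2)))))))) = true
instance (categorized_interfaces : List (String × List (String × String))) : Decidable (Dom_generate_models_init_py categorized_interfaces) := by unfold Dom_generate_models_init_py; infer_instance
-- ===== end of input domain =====

-- B merges A's two scans over categorized_interfaces into one pass keeping two line buffers (objective: simpler).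

-- ===== PORT A =====
-- shared helper: Python str.title(), ported by hand character by character
-- (exact on the printable-ASCII domain, where 'cased character' = ASCII letter)
def pyTitleAux : List Char → Bool → List Char
  | [], _ => []
  | c :: rest, prevAlpha =>
    (if prevAlpha then c.toLower else c.toUpper) :: pyTitleAux rest c.isAlpha

def pyTitle (s : String) : String := String.ofList (pyTitleAux s.toList false)

-- body of A's first 'for category, interfaces in …' loop
def pvStepA1 (lines : List String) (kv : String × List (String × String)) : List String :=
  if kv.2 ≠ [] then
    let lines := lines ++ ["# " ++ pyTitle kv.1 ++ " Models"]
    let lines := lines ++ ["from ." ++ kv.1 ++ " import ("]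
    let lines := kv.2.foldl (fun l m => l ++ ["    " ++ m.1 ++ ","]) lines
    (lines ++ [")"]) ++ [""]
  else lines

-- body of A's second loop (the __all__ entries)
def pvStepA2 (lines : List String) (kv : String × List (String × String)) : List String :=
  if kv.2 ≠ [] then
    kv.2.foldl (fun l m => l ++ ["    \"" ++ m.1 ++ "\","]) lines
  else lines

def generate_models_init_py (categorized_interfaces : List (String × List (String × String))) : String :=
  let lines : List String :=
    ["\"\"\"", "ENTITIES MODELS - Organized by Category",
     "Auto-generated from TypeScript entities", "\"\"\"", "",
     "from .base import BaseModel", ""]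
  let lines := categorized_interfaces.foldl pvStepA1 lines
  let lines := lines ++ ["__all__ = ["] ++ ["    \"BaseModel\","]
  let lines := categorized_interfaces.foldl pvStepA2 lines
  let lines := lines ++ ["]"]
  PySem.Str.join "\n" lines

-- ===== PORT B =====
-- body of B's single loop: extends both buffers for a non-empty category
def pvStepB (acc : List String × List String) (kv : String × List (String × String)) :
    List String × List String :=
  if kv.2 = [] then acc
  else
    (acc.1 ++ ["# " ++ pyTitle kv.1 ++ " Models", "from ." ++ kv.1 ++ " import ("]
           ++ kv.2.map (fun m => "    " ++ m.1 ++ ",") ++ [")", ""],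
     acc.2 ++ kv.2.map (fun m => "    \"" ++ m.1 ++ "\","))

def generate_models_init_py_alt (categorized_interfaces : List (String × List (String × String))) : String :=
  let bufs := categorized_interfaces.foldl pvStepB ([], [])
  let header : List String :=
    ["\"\"\"", "ENTITIES MODELS - Organized by Category",
     "Auto-generated from TypeScript entities", "\"\"\"", "",
     "from .base import BaseModel", ""]
  PySem.Str.join "\n"
    (header ++ bufs.1 ++ ["__all__ = [", "    \"BaseModel\","] ++ bufs.2 ++ ["]"])

-- ===== PRECONDITION & SPEC =====
def Spec_generate_models_init_py (categorized_interfaces : List (String × List (String × String))) (out : String) : Prop := out = generate_models_init_py_alt categorized_interfaces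
instance (categorized_interfaces : List (String × List (String × String))) (out : String) : Decidable (Spec_generate_models_init_py categorized_interfaces out) := by unfold Spec_generate_models_init_py; infer_instance

-- ===== CLAIM (what is proved, stated in full; the proofs are below) =====
def Claim_equal_generate_models_init_py : Prop := ∀ (categorized_interfaces : List (String × List (String × String))), Dom_generate_models_init_py categorized_interfaces → Spec_generate_models_init_py categorized_interfaces (generate_models_init_py categorized_interfaces)

-- ===== LEMMAS AND PROOFS =====

-- flatten of singleton lists is a map (simp normal form of A's inner append-loops)
theorem pv_flatten_singleton {α β : Type} (f : α → β) (xs : List α) :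
    (xs.map (fun x => [f x])).flatten = xs.map f := by
  induction xs with
  | nil => rfl
  | cons x xs ih => simp [ih]

-- proof-side characterisations of B's two buffers
def pvB1 : List (String × List (String × String)) → List String
  | [] => []
  | kv :: rest =>
    (if kv.2 = [] then [] else
      ["# " ++ pyTitle kv.1 ++ " Models", "from ." ++ kv.1 ++ " import ("]
        ++ kv.2.map (fun m => "    " ++ m.1 ++ ",") ++ [")", ""]) ++ pvB1 rest

def pvB2 : List (String × List (String × String)) → List String
  | [] => []
  | kv :: rest =>
    (if kv.2 = [] then [] else kv.2.map (fun m => "    \"" ++ m.1 ++ "\",")) ++ pvB2 rest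

theorem pv_foldB_eq (ci : List (String × List (String × String))) (a b : List String) :
    ci.foldl pvStepB (a, b) = (a ++ pvB1 ci, b ++ pvB2 ci) := by
  induction ci generalizing a b with
  | nil => simp [pvB1, pvB2]
  | cons kv rest ih =>
    by_cases h : kv.2 = []
    · simp [List.foldl_cons, pvStepB, h, ih, pvB1, pvB2]
    · simp only [List.foldl_cons, pvStepB, if_neg h]
      rw [ih]
      simp [pvB1, pvB2, h, List.append_assoc]

theorem pv_A1_eq (ci : List (String × List (String × String))) (l : List String) :
    ci.foldl pvStepA1 l = l ++ pvB1 ci := by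
  induction ci generalizing l with
  | nil => simp [pvB1]
  | cons kv rest ih =>
    simp only [List.foldl_cons, ih]
    by_cases h : kv.2 = []
    · simp [pvStepA1, pvB1, h]
    · simp [pvStepA1, pvB1, h, pv_flatten_singleton, List.append_assoc]

theorem pv_A2_eq (ci : List (String × List (String × String))) (l : List String) :
    ci.foldl pvStepA2 l = l ++ pvB2 ci := by
  induction ci generalizing l with
  | nil => simp [pvB2]
  | cons kv rest ih =>
    simp only [List.foldl_cons, ih]
    by_cases h : kv.2 = []
    · simp [pvStepA2, pvB2, h]
    · simp [pvStepA2, pvB2, h, pv_flatten_singleton, List.append_assoc]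

-- ===== VERDICT (by name: the statement is the Claim_ definition above) =====
theorem generate_models_init_py_spec : Claim_equal_generate_models_init_py := by
  intro ci _
  show _ = _
  simp only [generate_models_init_py, generate_models_init_py_alt,
    pv_A1_eq, pv_A2_eq, pv_foldB_eq, List.nil_append, List.singleton_append, List.append_assoc]
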